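-- pv_equiv track=rewrite | github.com/kelvinhuang0327/number-pattern-research | tools/backtest_biglotto_comprehensive.py | _diversify_biglotto
-- ===== SOURCE A (Python) =====
-- from collections import Counter
--
-- MAX_NUM = 49
--
-- PICK = 6
--
-- def _get_zone_biglotto(num):
--     """5-zone division for Big Lotto (1-49)."""
--     if num <= 10:
--         return 1
--     elif num <= 20:
--         return 2
--     elif num <= 30:
--         return 3
--     elif num <= 40:
--         return 4
--     else:
--         return 5
--
-- def _diversify_biglotto(bet1, bet2, history, max_overlap=3):
--     """Ensure overlap <= max_overlap, fill with cold numbers and zone balance."""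
--     overlap = set(bet1) & set(bet2)
--     if len(overlap) <= max_overlap:
--         return bet1, bet2
--
--     recent = history[-50:] if len(history) >= 50 else history
--     last_seen = {i: len(recent) for i in range(1, MAX_NUM + 1)}
--     for idx, h in enumerate(recent):
--         for num in h['numbers']:
--             gap = len(recent) - 1 - idx
--             if gap < last_seen[num]:
--                 last_seen[num] = gap
--
--     new_bet2 = [n for n in bet2 if n not in overlap][:max_overlap]
--     cold = sorted(last_seen.items(), key=lambda x: -x[1])
--     zones_used = Counter(_get_zone_biglotto(n) for n in new_bet2)
--
--     for n, gap in cold: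
--         if n not in bet1 and n not in new_bet2 and len(new_bet2) < PICK:
--             z = _get_zone_biglotto(n)
--             if zones_used[z] < 2:
--                 new_bet2.append(n)
--                 zones_used[z] += 1
--
--     for n, gap in cold:
--         if n not in bet1 and n not in new_bet2 and len(new_bet2) < PICK:
--             new_bet2.append(n)
--
--     return bet1, sorted(new_bet2[:PICK])
-- ===== SOURCE B (Python) =====
-- MAX_NUM = 49
--
-- PICK = 6
--
-- def _zone(num):
--     """Zone of num, arithmetically (clamped to 1..5)."""
--     return min(5, max(1, (num - 1) // 10 + 1))
--
-- def _diversify_biglotto(bet1, bet2, history, max_overlap=3):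
--     overlap = set(bet1) & set(bet2)
--     if len(overlap) <= max_overlap:
--         return bet1, bet2
--
--     recent = history[-50:] if len(history) >= 50 else history
--     L = len(recent)
--
--     # reverse sweep: the first sighting of a number is its minimal gap
--     gap_of = {}
--     for j, h in enumerate(reversed(recent)):
--         for num in h['numbers']:
--             if num not in gap_of:
--                 gap_of[num] = j
--
--     # counting sort: drop numbers into gap buckets, read buckets coldest-first
--     buckets = [[] for _ in range(L + 1)]
--     for n in range(1, MAX_NUM + 1):
--         buckets[gap_of.get(n, L)].append(n)
--
--     base = [n for n in bet2 if n not in overlap][:max_overlap]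
--     quota = {z: 2 for z in range(1, 6)}
--     for n in base:
--         quota[_zone(n)] -= 1
--     slots = PICK - len(base)
--
--     picked, leftovers = [], []
--     for g in range(L, -1, -1):
--         for n in buckets[g]:
--             if n in bet1 or n in base:
--                 continue
--             if len(picked) < slots and quota[_zone(n)] > 0:
--                 picked.append(n)
--                 quota[_zone(n)] -= 1
--             else:
--                 leftovers.append(n)
--
--     extra = leftovers[:max(0, slots - len(picked))]
--     return bet1, sorted((base + picked + extra)[:PICK])
-- ===== Notes on version B (the rewrite author's own statement) =====
-- stated objective: alternative
-- what changed: B replaces A's comparison sort of the recency table by a counting sort (a reverse sweep records each number's first sighting as its gap, numbers are dropped into gap-indexed buckets and read back coldest-bucket-first), and replaces A's two scans over the sorted list (with membership tests against the growing bet) by one classification pass into picked/leftovers driven by per-zone quotas counting down, finished by slicing a prefix of the leftovers.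
import Mathlib
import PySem

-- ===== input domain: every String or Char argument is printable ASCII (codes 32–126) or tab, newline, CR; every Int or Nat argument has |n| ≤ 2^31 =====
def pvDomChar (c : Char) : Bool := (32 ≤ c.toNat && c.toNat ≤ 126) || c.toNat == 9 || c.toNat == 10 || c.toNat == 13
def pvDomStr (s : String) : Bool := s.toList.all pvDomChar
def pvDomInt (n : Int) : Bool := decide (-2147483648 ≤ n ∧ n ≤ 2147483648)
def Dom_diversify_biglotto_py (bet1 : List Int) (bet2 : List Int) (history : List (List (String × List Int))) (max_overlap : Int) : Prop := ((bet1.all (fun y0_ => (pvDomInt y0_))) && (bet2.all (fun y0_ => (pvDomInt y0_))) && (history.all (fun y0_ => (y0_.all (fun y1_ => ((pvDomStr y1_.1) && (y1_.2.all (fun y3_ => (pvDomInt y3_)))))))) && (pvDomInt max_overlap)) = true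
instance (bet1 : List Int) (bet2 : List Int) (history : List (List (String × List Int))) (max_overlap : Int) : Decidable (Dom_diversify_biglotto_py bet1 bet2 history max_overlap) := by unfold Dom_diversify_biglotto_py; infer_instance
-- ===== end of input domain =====

-- B replaces A's comparison sort of the recency table by a counting sort (a reverse sweep
-- records each number's first sighting as its gap, numbers are dropped into gap-indexed
-- buckets and read back coldest-bucket-first), and replaces A's two fill passes over the
-- sorted list by one classification pass into picked/leftovers driven by per-zone quotas
-- counting down, finished by slicing a prefix of the leftovers. Objective: alternative.

-- ===== PORT A =====
def zoneA (num : Int) : Int :=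
  if num ≤ 10 then 1 else if num ≤ 20 then 2 else if num ≤ 30 then 3
  else if num ≤ 40 then 4 else 5

-- one history row of A's min-update table loop (gap = len(recent) - 1 - idx)
def rowA (L : Int) (d : PySem.Dict Int Int) (p : Int × List (String × List Int)) : PySem.Dict Int Int :=
  ((PySem.Dict.mk p.2).getD "numbers" []).foldl
    (fun d num => if L - 1 - p.1 < d.getD num 0 then d.insert num (L - 1 - p.1) else d) d

-- A's first (zone-balanced) fill pass, state = (new_bet2, zones_used)
def passA1 (bet1 : List Int) (st : List Int × PySem.Dict Int Int) (p : Int × Int) :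
    List Int × PySem.Dict Int Int :=
  if p.1 ∉ bet1 ∧ p.1 ∉ st.1 ∧ st.1.length < 6 then
    if st.2.getD (zoneA p.1) 0 < 2 then (st.1 ++ [p.1], st.2.modify (zoneA p.1) 0 (· + 1))
    else st
  else st

-- A's second fill pass
def passA2 (bet1 : List Int) (nb : List Int) (p : Int × Int) : List Int :=
  if p.1 ∉ bet1 ∧ p.1 ∉ nb ∧ nb.length < 6 then nb ++ [p.1] else nb

def diversify_biglotto_py (bet1 : List Int) (bet2 : List Int) (history : List (List (String × List Int))) (max_overlap : Int) : List Int × List Int :=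
  let overlap := PySem.Set.inter (PySem.Set.ofList bet1) (PySem.Set.ofList bet2)
  if (overlap.length : Int) ≤ max_overlap then (bet1, bet2)
  else
    let recent := if history.length ≥ 50 then PySem.List.slice history (some (-50)) none else history
    let last_seen :=
      (PySem.List.enumerate recent).foldl (rowA (recent.length : Int))
        ((PySem.List.pyRange 1 (49 + 1) 1).foldl
          (fun d i => d.insert i (recent.length : Int)) PySem.Dict.empty)
    let new_bet2 := PySem.List.slice (bet2.filter (fun n => !(overlap.contains n))) none (some max_overlap)
    let cold := PySem.List.sorted last_seen.items (fun x => -x.2)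
    let zones_used := PySem.Dict.counter (new_bet2.map zoneA)
    let st1 := cold.foldl (passA1 bet1) (new_bet2, zones_used)
    let nb2 := cold.foldl (passA2 bet1) st1.1
    (bet1, PySem.List.sorted (PySem.List.slice nb2 none (some 6)) (fun x => x))

-- ===== PORT B =====
def zoneB (num : Int) : Int := min 5 (max 1 (PySem.Int.floordiv (num - 1) 10 + 1))

-- reverse sweep: p.1 = index in reversed(recent); the first sighting of a number wins
def rowB (d : PySem.Dict Int Int) (p : Int × List (String × List Int)) : PySem.Dict Int Int :=
  ((PySem.Dict.mk p.2).getD "numbers" []).foldl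
    (fun d num => if d.contains num then d else d.insert num p.1) d

-- buckets[gap_of.get(n, L)].append(n); the bucket index is ≥ 0, so .toNat is exact here
def dropB (gap_of : PySem.Dict Int Int) (L : Int) (bk : List (List Int)) (n : Int) : List (List Int) :=
  bk.modify (gap_of.getD n L).toNat (fun b => b ++ [n])

-- classify one candidate into picked/leftovers, state = (picked, leftovers, quota)
def classB (bet1 base : List Int) (slots : Int) (st : List Int × List Int × PySem.Dict Int Int) (n : Int) :
    List Int × List Int × PySem.Dict Int Int :=
  if n ∈ bet1 ∨ n ∈ base then st
  else if (st.1.length : Int) < slots ∧ 0 < st.2.2.getD (zoneB n) 0 then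
    (st.1 ++ [n], st.2.1, st.2.2.modify (zoneB n) 0 (· - 1))
  else (st.1, st.2.1 ++ [n], st.2.2)

def diversify_biglotto_py_alt (bet1 : List Int) (bet2 : List Int) (history : List (List (String × List Int))) (max_overlap : Int) : List Int × List Int :=
  let overlap := PySem.Set.inter (PySem.Set.ofList bet1) (PySem.Set.ofList bet2)
  if (overlap.length : Int) ≤ max_overlap then (bet1, bet2)
  else
    let recent := if history.length ≥ 50 then PySem.List.slice history (some (-50)) none else history
    let L : Int := (recent.length : Int)
    let gap_of := (PySem.List.enumerate recent.reverse).foldl rowB PySem.Dict.empty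
    let buckets0 := (PySem.List.pyRange 0 (L + 1) 1).map (fun _ => ([] : List Int))
    let buckets := (PySem.List.pyRange 1 (49 + 1) 1).foldl (dropB gap_of L) buckets0
    let base := PySem.List.slice (bet2.filter (fun n => !(overlap.contains n))) none (some max_overlap)
    let quota0 := (PySem.List.pyRange 1 6 1).foldl (fun d z => d.insert z (2 : Int)) PySem.Dict.empty
    let quota := base.foldl (fun d n => d.modify (zoneB n) 0 (· - 1)) quota0
    let slots := (6 : Int) - (base.length : Int)
    let st := (PySem.List.pyRange L (-1) (-1)).foldl
        (fun st g => (PySem.List.pyGetD buckets g []).foldl (classB bet1 base slots) st)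
        (([] : List Int), ([] : List Int), quota)
    let extra := PySem.List.slice st.2.1 none (some (max 0 (slots - (st.1.length : Int))))
    (bet1, PySem.List.sorted (PySem.List.slice (base ++ st.1 ++ extra) none (some 6)) (fun x => x))

-- ===== PRECONDITION & SPEC =====
-- Pre_ excludes exactly the inputs where the Python A raises: when the bets overlap in more
-- than max_overlap numbers, A looks up h['numbers'] in each recent draw (KeyError if absent)
-- and indexes last_seen[num] for each drawn number (KeyError if num is outside 1..49).
def Pre_diversify_biglotto_py (bet1 : List Int) (bet2 : List Int) (history : List (List (String × List Int))) (max_overlap : Int) : Prop :=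
  (((PySem.Set.inter (PySem.Set.ofList bet1) (PySem.Set.ofList bet2)).length : Int) ≤ max_overlap) ∨
  ∀ h ∈ (if history.length ≥ 50 then PySem.List.slice history (some (-50)) none else history),
    ((PySem.Dict.mk h).get? "numbers").isSome = true ∧
    ∀ num ∈ (PySem.Dict.mk h).getD "numbers" [], 1 ≤ num ∧ num ≤ 49
instance (bet1 : List Int) (bet2 : List Int) (history : List (List (String × List Int))) (max_overlap : Int) : Decidable (Pre_diversify_biglotto_py bet1 bet2 history max_overlap) := by unfold Pre_diversify_biglotto_py; infer_instance

def pvWitness_diversify_biglotto_py : List Int × List Int × (List (List (String × List Int))) × Int :=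
  ([1, 2, 3, 4], [1, 2, 3, 4, 5, 6], [[("numbers", [5, 7, 12])], [("numbers", [44, 2])]], 3)

def Spec_diversify_biglotto_py (bet1 : List Int) (bet2 : List Int) (history : List (List (String × List Int))) (max_overlap : Int) (out : List Int × List Int) : Prop := out = diversify_biglotto_py_alt bet1 bet2 history max_overlap
instance (bet1 : List Int) (bet2 : List Int) (history : List (List (String × List Int))) (max_overlap : Int) (out : List Int × List Int) : Decidable (Spec_diversify_biglotto_py bet1 bet2 history max_overlap out) := by unfold Spec_diversify_biglotto_py; infer_instance

-- ===== CLAIM (what is proved, stated in full; the proofs are below) =====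
def Claim_equal_diversify_biglotto_py : Prop := ∀ (bet1 : List Int) (bet2 : List Int) (history : List (List (String × List Int))) (max_overlap : Int), Dom_diversify_biglotto_py bet1 bet2 history max_overlap → Pre_diversify_biglotto_py bet1 bet2 history max_overlap → Spec_diversify_biglotto_py bet1 bet2 history max_overlap (diversify_biglotto_py bet1 bet2 history max_overlap)

-- ===== LEMMAS AND PROOFS =====

-- ---------- proof-side helpers ----------
def numsOf (h : List (String × List Int)) : List Int := (PySem.Dict.mk h).getD "numbers" []

-- ghost forward-overwrite table row (a later, i.e. smaller, gap overwrites)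
def rowF (L : Int) (d : PySem.Dict Int Int) (p : Int × List (String × List Int)) : PySem.Dict Int Int :=
  ((PySem.Dict.mk p.2).getD "numbers" []).foldl (fun d num => d.insert num (L - 1 - p.1)) d

-- value-level row steps: a row is (value to record, numbers of the draw)
def rstepF (d : PySem.Dict Int Int) (r : Int × List Int) : PySem.Dict Int Int :=
  r.2.foldl (fun d num => d.insert num r.1) d
def rstepR (d : PySem.Dict Int Int) (r : Int × List Int) : PySem.Dict Int Int :=
  r.2.foldl (fun d num => if d.contains num then d else d.insert num r.1) d
def rowsOf (R : List (List (String × List Int))) (L : Int) : List (Int × List Int) :=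
  (PySem.List.enumerate R).map (fun p => (L - 1 - p.1, numsOf p.2))
def rowsRevOf (R : List (List (String × List Int))) : List (Int × List Int) :=
  (PySem.List.enumerate R.reverse).map (fun p => (p.1, numsOf p.2))

-- number-level versions of A's two passes (A's passes read only the number of each pair)
def A1 (bet1 : List Int) (st : List Int × PySem.Dict Int Int) (n : Int) :
    List Int × PySem.Dict Int Int := passA1 bet1 st (n, 0)
def A2 (bet1 : List Int) (nb : List Int) (n : Int) : List Int := passA2 bet1 nb (n, 0)

-- append-while-shorter-than-6 (the shape of A's second pass)
def extB (nb : List Int) (n : Int) : List Int := if nb.length < 6 then nb ++ [n] else nb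

-- the strict order realised by A's stable sort: colder first, ties by first component
def lexLt (a b : Int × Int) : Prop := b.2 < a.2 ∨ (a.2 = b.2 ∧ a.1 < b.1)

-- ---------- generic small lemmas ----------
theorem zone_eq (n : Int) : zoneA n = zoneB n := by
  unfold zoneA zoneB
  rw [PySem.Int.floordiv_eq_ediv_of_pos (by norm_num)]
  simp only [min_def, max_def]
  split_ifs <;> omega

theorem zoneB_bounds (n : Int) : 1 ≤ zoneB n ∧ zoneB n ≤ 5 := by
  unfold zoneB
  simp only [min_def, max_def]
  split_ifs <;> omega

theorem extB_take (ls : List Int) : ∀ acc : List Int,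
    ls.foldl extB acc = acc ++ ls.take (6 - acc.length) := by
  induction ls with
  | nil => intro acc; simp
  | cons n ls ih =>
    intro acc
    simp only [List.foldl_cons]
    by_cases h : acc.length < 6
    · have h6 : 6 - acc.length = (6 - (acc.length + 1)) + 1 := by omega
      rw [show extB acc n = acc ++ [n] by simp [extB, h], ih, h6, List.take_succ_cons]
      simp
    · rw [show extB acc n = acc by simp [extB, h], ih, show 6 - acc.length = 0 by omega]
      simp [show 6 - acc.length = 0 by omega]

-- ---------- the recency table: forward min-update = reverse first-sighting ----------
theorem keysAux (L : Int) (dA dB : PySem.Dict Int Int)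
    (hlink : dA.items = (PySem.List.pyRange 1 (49 + 1) 1).map (fun n => (n, dB.getD n L))) :
    dA.keys = PySem.List.pyRange 1 (49 + 1) 1 := by
  show dA.items.map Prod.fst = _
  rw [hlink, List.map_map]
  have : (Prod.fst ∘ fun n : Int => (n, dB.getD n L)) = id := rfl
  rw [this, List.map_id]

theorem getDAux (L : Int) (num : Int) (h1 : 1 ≤ num) (h2 : num ≤ 49)
    (dA dB : PySem.Dict Int Int)
    (hlink : dA.items = (PySem.List.pyRange 1 (49 + 1) 1).map (fun n => (n, dB.getD n L))) :
    dA.getD num 0 = dB.getD num L := by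
  have hnd : dA.keys.Nodup := by
    rw [keysAux L dA dB hlink]; exact PySem.List.nodup_pyRange_one 1 50
  have hm : (num, dB.getD num L) ∈ dA.items := by
    rw [hlink]
    exact List.mem_map_of_mem ((PySem.List.mem_pyRange_one).2 ⟨h1, by omega⟩)
  exact PySem.Dict.getD_of_mem_items dA hm hnd 0

theorem numAux (L g : Int) (nums : List Int) (dA dB : PySem.Dict Int Int)
    (hnums : ∀ num ∈ nums, 1 ≤ num ∧ num ≤ 49)
    (hlink : dA.items = (PySem.List.pyRange 1 (49 + 1) 1).map (fun n => (n, dB.getD n L)))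
    (hge : ∀ n : Int, g ≤ dB.getD n L) :
    (nums.foldl (fun d num => if g < d.getD num 0 then d.insert num g else d) dA).items
      = (PySem.List.pyRange 1 (49 + 1) 1).map
          (fun n => (n, (nums.foldl (fun d num => d.insert num g) dB).getD n L))
    ∧ ∀ n : Int, g ≤ (nums.foldl (fun d num => d.insert num g) dB).getD n L := by
  induction nums generalizing dA dB with
  | nil => exact ⟨hlink, hge⟩
  | cons num rest ih =>
    obtain ⟨h1, h2⟩ := hnums num (by simp)
    simp only [List.foldl_cons]
    have hrest : ∀ x ∈ rest, 1 ≤ x ∧ x ≤ 49 := fun x hx => hnums x (List.mem_cons_of_mem _ hx)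
    have hAB := getDAux L num h1 h2 dA dB hlink
    have hgeB : ∀ n : Int, g ≤ (dB.insert num g).getD n L := by
      intro n
      rw [PySem.Dict.getD_insert]
      split_ifs with h
      · exact le_refl g
      · exact hge n
    by_cases hlt : g < dA.getD num 0
    · rw [if_pos hlt]
      have hc : dA.contains num = true := by
        rw [PySem.Dict.contains_iff_mem_keys, keysAux L dA dB hlink]
        exact (PySem.List.mem_pyRange_one).2 ⟨h1, by omega⟩
      have hlink' : (dA.insert num g).items
          = (PySem.List.pyRange 1 (49 + 1) 1).map (fun n => (n, (dB.insert num g).getD n L)) := by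
        rw [PySem.Dict.items_insert_of_contains dA g hc, hlink, List.map_map]
        apply List.map_congr_left
        intro n hn
        simp only [Function.comp]
        rw [PySem.Dict.getD_insert]
        by_cases heq : n = num
        · simp [heq]
        · have hb : (n == num) = false := by simp [heq]
          simp [hb, heq]
      exact ih _ _ hrest hlink' hgeB
    · rw [if_neg hlt]
      have heq : dB.getD num L = g := le_antisymm (by rw [← hAB]; omega) (hge num)
      have hlink' : dA.items
          = (PySem.List.pyRange 1 (49 + 1) 1).map (fun n => (n, (dB.insert num g).getD n L)) := by
        rw [hlink]
        apply List.map_congr_left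
        intro n hn
        rw [PySem.Dict.getD_insert]
        by_cases hne : n = num
        · subst hne; rw [if_pos rfl, heq]
        · rw [if_neg hne]
      exact ih _ _ hrest hlink' hgeB

theorem tableAux (L : Int) (l : List (List (String × List Int))) (s : Int)
    (dA dF : PySem.Dict Int Int)
    (hPre : ∀ h ∈ l, ∀ num ∈ (PySem.Dict.mk h).getD "numbers" [], 1 ≤ num ∧ num ≤ 49)
    (hlink : dA.items = (PySem.List.pyRange 1 (49 + 1) 1).map (fun n => (n, dF.getD n L)))
    (hge : ∀ n : Int, L - 1 - s ≤ dF.getD n L) :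
    ((PySem.List.enumerate l s).foldl (rowA L) dA).items
      = (PySem.List.pyRange 1 (49 + 1) 1).map
          (fun n => (n, ((PySem.List.enumerate l s).foldl (rowF L) dF).getD n L)) := by
  induction l generalizing s dA dF with
  | nil => simpa [PySem.List.enumerate] using hlink
  | cons h t ih =>
    rw [PySem.List.enumerate_cons]
    simp only [List.foldl_cons]
    obtain ⟨hlink', hge'⟩ := numAux L (L - 1 - s) ((PySem.Dict.mk h).getD "numbers" []) dA dF
      (hPre h (by simp)) hlink hge
    exact ih (s + 1) _ _ (fun x hx => hPre x (List.mem_cons_of_mem _ hx)) hlink'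
      (fun n => le_trans (by omega) (hge' n))

-- one forward-overwrite row: the recorded value is j for members, unchanged otherwise
theorem rstepF_getD (ns : List Int) (j : Int) : ∀ (d : PySem.Dict Int Int) (n v : Int),
    (ns.foldl (fun d num => d.insert num j) d).getD n v
      = if n ∈ ns then j else d.getD n v := by
  induction ns with
  | nil => intro d n v; simp
  | cons m rest ih =>
    intro d n v
    simp only [List.foldl_cons]
    rw [ih]
    by_cases hr : n ∈ rest
    · simp [hr]
    · rw [if_neg hr, PySem.Dict.getD_insert]
      by_cases hm : n = m
      · simp [hm]
      · simp [hm, hr]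

-- one guarded (first-sighting) row
theorem rstepR_row (ns : List Int) (j : Int) : ∀ (d : PySem.Dict Int Int) (n v : Int),
    ((ns.foldl (fun d num => if d.contains num then d else d.insert num j) d).getD n v
      = if d.contains n then d.getD n v else if n ∈ ns then j else v)
    ∧ (ns.foldl (fun d num => if d.contains num then d else d.insert num j) d).contains n
      = (d.contains n || decide (n ∈ ns)) := by
  induction ns with
  | nil =>
    intro d n v
    refine ⟨?_, by simp⟩
    by_cases hdn : d.contains n
    · simp [hdn]
    · have hdn' : d.contains n = false := by simpa using hdn
      have hg : d.getD n v = v := PySem.Dict.getD_of_not_contains (h := hdn') ..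
      simp [hdn', hg]
  | cons m rest ih =>
    intro d n v
    simp only [List.foldl_cons]
    by_cases hc : d.contains m
    · rw [if_pos hc]
      obtain ⟨ihg, ihc⟩ := ih d n v
      constructor
      · rw [ihg]
        by_cases hdn : d.contains n
        · simp [hdn]
        · by_cases hm : n = m
          · subst hm; exact absurd hc hdn
          · simp [hdn, List.mem_cons, hm]
      · rw [ihc]
        by_cases hm : n = m
        · subst hm; simp [hc]
        · simp [hm]
    · rw [if_neg hc]
      obtain ⟨ihg, ihc⟩ := ih (d.insert m j) n v
      constructor
      · rw [ihg, PySem.Dict.contains_insert, PySem.Dict.getD_insert]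
        by_cases hm : n = m
        · subst hm
          have hdn : d.contains n = false := by simpa using hc
          simp [hdn]
        · have hb : (n == m) = false := by simp [hm]
          simp only [hb, Bool.false_or, if_neg hm]
          by_cases hdn : d.contains n
          · simp [hdn, hm]
          · simp [hdn, hm]
      · rw [ihc, PySem.Dict.contains_insert]
        by_cases hm : n = m
        · subst hm; simp
        · have hb : (n == m) = false := by simp [hm]
          simp [hb, hm]

-- forward overwrite over a row list: the LAST row containing n wins
theorem fwdChar (rows : List (Int × List Int)) : ∀ (d : PySem.Dict Int Int) (n v : Int),
    (rows.foldl rstepF d).getD n v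
      = (((rows.reverse.find? (fun r => decide (n ∈ r.2))).map Prod.fst).getD (d.getD n v)) := by
  induction rows with
  | nil => intro d n v; simp
  | cons r rest ih =>
    intro d n v
    simp only [List.foldl_cons, List.reverse_cons]
    rw [ih, List.find?_append]
    cases hfind : rest.reverse.find? (fun r => decide (n ∈ r.2)) with
    | some r' => simp
    | none =>
      simp only [Option.none_or]
      rw [List.find?_cons]
      by_cases hm : n ∈ r.2
      · simp only [hm, decide_true]
        show (rstepF d r).getD n v = _
        unfold rstepF
        rw [rstepF_getD, if_pos hm]
        rfl
      · simp only [hm, decide_false]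
        show (rstepF d r).getD n v = _
        unfold rstepF
        rw [rstepF_getD, if_neg hm]
        simp

-- guarded first-sighting over a row list: the FIRST row containing n wins
theorem revChar (rows : List (Int × List Int)) : ∀ (d : PySem.Dict Int Int) (n v : Int),
    ((rows.foldl rstepR d).getD n v
      = if d.contains n then d.getD n v
        else (((rows.find? (fun r => decide (n ∈ r.2))).map Prod.fst).getD v))
    ∧ (rows.foldl rstepR d).contains n
      = (d.contains n || rows.any (fun r => decide (n ∈ r.2))) := by
  induction rows with
  | nil =>
    intro d n v
    refine ⟨?_, by simp⟩
    by_cases hdn : d.contains n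
    · simp [hdn]
    · have hdn' : d.contains n = false := by simpa using hdn
      have hg : d.getD n v = v := PySem.Dict.getD_of_not_contains (h := hdn') ..
      simp [hdn', hg]
  | cons r rest ih =>
    intro d n v
    simp only [List.foldl_cons]
    obtain ⟨ihg, ihc⟩ := ih (rstepR d r) n v
    obtain ⟨rg, rc⟩ := rstepR_row r.2 r.1 d n v
    have rg' : (rstepR d r).getD n v = if d.contains n then d.getD n v else if n ∈ r.2 then r.1 else v := rg
    have rc' : (rstepR d r).contains n = (d.contains n || decide (n ∈ r.2)) := rc
    constructor
    · rw [ihg, rg', rc', List.find?_cons]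
      by_cases hdn : d.contains n
      · simp [hdn]
      · simp only [hdn, Bool.false_or, if_false, Bool.false_eq_true]
        by_cases hm : n ∈ r.2
        · simp [hm]
        · simp [hm]
    · rw [ihc, rc', List.any_cons]
      by_cases hdn : d.contains n <;> by_cases hm : n ∈ r.2 <;> simp [hdn, hm]

theorem enumerate_shift {α : Type} (S : List α) (s : Int) :
    PySem.List.enumerate S s = (PySem.List.enumerate S 0).map (fun p => (p.1 + s, p.2)) := by
  rw [PySem.List.enumerate_eq_zipIdx_map, PySem.List.enumerate_eq_zipIdx_map, List.map_map]
  apply List.map_congr_left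
  intro p _
  simp only [Function.comp, Prod.mk.injEq, and_true]
  omega

theorem enumerate_rev {α : Type} (S : List α) :
    PySem.List.enumerate S.reverse 0
      = ((PySem.List.enumerate S 0).reverse).map (fun p => ((S.length : Int) - 1 - p.1, p.2)) := by
  induction S with
  | nil => simp [PySem.List.enumerate]
  | cons x T ih =>
    rw [List.reverse_cons, PySem.List.enumerate_append, ih]
    rw [show PySem.List.enumerate (x :: T) 0 = ((0 : Int), x) :: PySem.List.enumerate T 1 from
      PySem.List.enumerate_cons x T 0]
    rw [List.reverse_cons, List.map_append]
    congr 1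
    · rw [enumerate_shift T 1, ← List.map_reverse, List.map_map]
      apply List.map_congr_left
      intro p _
      simp only [Function.comp, List.length_cons, Prod.mk.injEq, and_true]
      push_cast
      omega
    · rw [show PySem.List.enumerate [x] ((0 : Int) + (T.reverse.length : Int))
          = [(((0 : Int) + (T.reverse.length : Int)), x)] from by
        rw [PySem.List.enumerate_cons]; rfl]
      simp only [List.map_cons, List.map_nil, List.cons.injEq, Prod.mk.injEq, and_true,
        List.length_reverse, List.length_cons]
      push_cast
      omega

theorem rows_reverse (R : List (List (String × List Int))) :
    (rowsOf R (R.length : Int)).reverse = rowsRevOf R := by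
  unfold rowsOf rowsRevOf
  rw [enumerate_rev, List.map_map, ← List.map_reverse]
  apply List.map_congr_left
  intro p _
  rfl

-- the two table constructions agree on every number
theorem fwd_rev_eq (R : List (List (String × List Int))) (n : Int) :
    ((PySem.List.enumerate R).foldl (rowF (R.length : Int)) PySem.Dict.empty).getD n (R.length : Int)
      = ((PySem.List.enumerate R.reverse).foldl rowB PySem.Dict.empty).getD n (R.length : Int) := by
  have hF : (PySem.List.enumerate R).foldl (rowF (R.length : Int)) PySem.Dict.empty
      = (rowsOf R (R.length : Int)).foldl rstepF PySem.Dict.empty := by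
    unfold rowsOf
    rw [List.foldl_map]
    rfl
  have hR : (PySem.List.enumerate R.reverse).foldl rowB PySem.Dict.empty
      = (rowsRevOf R).foldl rstepR PySem.Dict.empty := by
    unfold rowsRevOf
    rw [List.foldl_map]
    rfl
  rw [hF, hR, fwdChar, (revChar (rowsRevOf R) PySem.Dict.empty n (R.length : Int)).1,
    rows_reverse]
  simp [PySem.Dict.contains_empty, PySem.Dict.getD_empty]

-- bounds of the recorded gaps
theorem gap_bounds (R : List (List (String × List Int))) (n : Int) :
    0 ≤ ((PySem.List.enumerate R.reverse).foldl rowB PySem.Dict.empty).getD n (R.length : Int)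
    ∧ ((PySem.List.enumerate R.reverse).foldl rowB PySem.Dict.empty).getD n (R.length : Int)
        ≤ (R.length : Int) := by
  have hR : (PySem.List.enumerate R.reverse).foldl rowB PySem.Dict.empty
      = (rowsRevOf R).foldl rstepR PySem.Dict.empty := by
    unfold rowsRevOf
    rw [List.foldl_map]
    rfl
  rw [hR, (revChar (rowsRevOf R) PySem.Dict.empty n (R.length : Int)).1]
  rw [PySem.Dict.contains_empty]
  simp only [if_false, Bool.false_eq_true]
  cases hfind : (rowsRevOf R).find? (fun r => decide (n ∈ r.2)) with
  | none =>
    simp only [Option.map_none, Option.getD_none]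
    exact ⟨Int.natCast_nonneg _, le_refl _⟩
  | some r =>
    have hr : r ∈ rowsRevOf R := List.mem_of_find?_eq_some hfind
    have hmem : r.1 ∈ (rowsRevOf R).map Prod.fst := List.mem_map_of_mem hr
    rw [show (rowsRevOf R).map Prod.fst = (PySem.List.enumerate R.reverse).map (fun p => p.1) by
      unfold rowsRevOf; rw [List.map_map]; rfl] at hmem
    rw [PySem.List.map_fst_enumerate] at hmem
    have hb := (PySem.List.mem_pyRange_one).1 hmem
    rw [List.length_reverse] at hb
    simp only [Option.map_some, Option.getD_some]
    omega

-- ---------- buckets realise filtering by gap ----------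
theorem bucket_char (G : PySem.Dict Int Int) (L : Int)
    (hGb : ∀ n : Int, 0 ≤ G.getD n L ∧ G.getD n L ≤ L) (ns : List Int) :
    ∀ (bk : List (List Int)), bk.length = (L + 1).toNat →
    (ns.foldl (dropB G L) bk).length = (L + 1).toNat
    ∧ ∀ g : Int, 0 ≤ g → g ≤ L →
        PySem.List.pyGetD (ns.foldl (dropB G L) bk) g []
          = PySem.List.pyGetD bk g [] ++ ns.filter (fun n => G.getD n L == g) := by
  induction ns with
  | nil => intro bk hlen; exact ⟨hlen, fun g _ _ => by simp⟩
  | cons n rest ih =>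
    intro bk hlen
    simp only [List.foldl_cons]
    have hlen' : (dropB G L bk n).length = (L + 1).toNat := by
      unfold dropB; rw [List.length_modify]; exact hlen
    obtain ⟨ihlen, ihget⟩ := ih (dropB G L bk n) hlen'
    refine ⟨ihlen, fun g hg0 hgL => ?_⟩
    rw [ihget g hg0 hgL]
    obtain ⟨hn0, hnL⟩ := hGb n
    have hgetbk : PySem.List.pyGetD bk g [] = bk[g.toNat]'(by rw [hlen]; omega) :=
      PySem.List.pyGetD_eq_getElem bk [] hg0 (by rw [hlen]; push_cast; omega)
    have hgetbk' : PySem.List.pyGetD (dropB G L bk n) g []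
        = (dropB G L bk n)[g.toNat]'(by rw [hlen']; omega) :=
      PySem.List.pyGetD_eq_getElem _ [] hg0 (by rw [hlen']; push_cast; omega)
    rw [hgetbk, hgetbk']
    unfold dropB
    rw [List.getElem_modify]
    by_cases he : G.getD n L = g
    · rw [if_pos (by omega), List.filter_cons_of_pos (by simp [he])]
      simp
    · rw [if_neg (by omega), List.filter_cons_of_neg (by simp [he])]

-- ---------- stable sort = bucket concatenation ----------
theorem insertBy_lex (x : Int × Int) : ∀ (acc : List (Int × Int)),
    acc.Pairwise lexLt → (∀ y ∈ acc, y.1 < x.1) →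
    (PySem.List.insertBy (fun a b => decide (-a.2 < -b.2)) x acc).Pairwise lexLt := by
  intro acc
  induction acc with
  | nil =>
    intro _ _
    rw [show PySem.List.insertBy (fun a b => decide (-a.2 < -b.2)) x [] = [x] from rfl]
    simp
  | cons y ys ih =>
    intro hp hlt
    rw [show PySem.List.insertBy (fun a b => decide (-a.2 < -b.2)) x (y :: ys)
        = if (decide (-x.2 < -y.2)) then x :: y :: ys
          else y :: PySem.List.insertBy (fun a b => decide (-a.2 < -b.2)) x ys from rfl]
    by_cases hk : -x.2 < -y.2
    · rw [if_pos (by simpa using hk)]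
      refine List.Pairwise.cons ?_ hp
      intro z hz
      rcases List.mem_cons.1 hz with rfl | hz'
      · exact Or.inl (by omega)
      · have hyz := List.rel_of_pairwise_cons hp hz'
        unfold lexLt at hyz ⊢
        rcases hyz with h | h
        · exact Or.inl (by omega)
        · exact Or.inl (by omega)
    · rw [if_neg (by simpa using hk)]
      have hys := List.pairwise_cons.1 hp
      refine List.Pairwise.cons ?_ (ih hys.2 (fun z hz => hlt z (List.mem_cons_of_mem _ hz)))
      intro z hz
      rcases (PySem.List.mem_insertBy _ _ _ _).1 hz with rfl | hz'
      · unfold lexLt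
        by_cases he : z.2 = y.2
        · exact Or.inr ⟨he.symm, hlt y (by simp)⟩
        · exact Or.inl (by omega)
      · exact hys.1 z hz'

theorem sorted_foldl_aux : ∀ (xs acc : List (Int × Int)),
    acc.Pairwise lexLt → (∀ x ∈ xs, ∀ y ∈ acc, y.1 < x.1) →
    xs.Pairwise (fun a b => a.1 < b.1) →
    (xs.foldl (fun acc x => PySem.List.insertBy (fun a b => decide (-a.2 < -b.2)) x acc) acc).Pairwise lexLt := by
  intro xs
  induction xs with
  | nil => intro acc h _ _; simpa using h
  | cons x rest ih =>
    intro acc hacc hfst hxs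
    simp only [List.foldl_cons]
    have hxs' := List.pairwise_cons.1 hxs
    apply ih
    · exact insertBy_lex x acc hacc (fun y hy => hfst x (by simp) y hy)
    · intro x' hx' y hy
      rcases (PySem.List.mem_insertBy _ _ _ _).1 hy with rfl | hy'
      · exact hxs'.1 x' hx'
      · exact hfst x' (List.mem_cons_of_mem _ hx') y hy'
    · exact hxs'.2

theorem stable_sort_pairwise (xs : List (Int × Int))
    (h : xs.Pairwise (fun a b => a.1 < b.1)) :
    (PySem.List.sorted xs (fun p => -p.2)).Pairwise lexLt := by
  rw [PySem.List.sorted_eq_foldl_insertBy]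
  exact sorted_foldl_aux xs [] (by simp) (by simp) h

theorem lex_irrefl_pair (a b : Int × Int) (h1 : lexLt a b) (h2 : lexLt b a) : False := by
  unfold lexLt at h1 h2
  obtain ⟨a1, a2⟩ := a
  obtain ⟨b1, b2⟩ := b
  simp only at h1 h2
  omega

theorem perm_lex_eq : ∀ (l₁ l₂ : List (Int × Int)), l₁.Perm l₂ →
    l₁.Pairwise lexLt → l₂.Pairwise lexLt → l₁ = l₂ := by
  intro l₁
  induction l₁ with
  | nil =>
    intro l₂ hp _ _
    exact (hp.symm.eq_nil).symm
  | cons a t ih =>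
    intro l₂ hp h1 h2
    cases l₂ with
    | nil => exact absurd (hp.eq_nil) (by simp)
    | cons b t₂ =>
      by_cases hab : a = b
      · subst hab
        rw [ih t₂ hp.cons_inv (List.pairwise_cons.1 h1).2 (List.pairwise_cons.1 h2).2]
      · exfalso
        have ha2 : a ∈ b :: t₂ := hp.mem_iff.1 (by simp)
        have hb1 : b ∈ a :: t := hp.mem_iff.2 (by simp)
        have ha2' : a ∈ t₂ := by
          rcases List.mem_cons.1 ha2 with h | h
          · exact absurd h hab
          · exact h
        have hb1' : b ∈ t := by
          rcases List.mem_cons.1 hb1 with h | h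
          · exact absurd h.symm hab
          · exact h
        exact lex_irrefl_pair a b (List.rel_of_pairwise_cons h1 hb1')
          (List.rel_of_pairwise_cons h2 ha2')

theorem flat_perm : ∀ (gs : List Int) (l : List (Int × Int)), gs.Nodup →
    (∀ p ∈ l, p.2 ∈ gs) →
    (gs.flatMap (fun g => l.filter (fun p => p.2 == g))).Perm l := by
  intro gs
  induction gs with
  | nil =>
    intro l _ hcov
    cases l with
    | nil => simp
    | cons p t => exact absurd (hcov p (by simp)) (by simp)
  | cons g gs ih =>
    intro l hnd hcov
    simp only [List.flatMap_cons]
    have hnd' := List.nodup_cons.1 hnd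
    have hflat : gs.flatMap (fun g' => l.filter (fun p => p.2 == g'))
        = gs.flatMap (fun g' => (l.filter (fun p => !(p.2 == g))).filter (fun p => p.2 == g')) :=
      List.flatMap_congr (fun g' hg' => by
        rw [List.filter_filter]
        apply List.filter_congr
        intro p _
        by_cases hpg : p.2 = g'
        · have hgg : g' ≠ g := fun h => hnd'.1 (h ▸ hg')
          simp [hpg, hgg]
        · simp [hpg])
    rw [hflat]
    have hperm := ih (l.filter (fun p => !(p.2 == g))) hnd'.2 (fun p hp => by
      have hmem := List.mem_filter.1 hp
      have hcov' := hcov p hmem.1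
      rcases List.mem_cons.1 hcov' with h | h
      · exact absurd h (by simpa using hmem.2)
      · exact h)
    exact (List.Perm.append_left _ hperm).trans (List.filter_append_perm _ l)

theorem flat_pairwise : ∀ (gs : List Int) (l : List (Int × Int)),
    gs.Pairwise (fun a b => b < a) → l.Pairwise (fun a b => a.1 < b.1) →
    (gs.flatMap (fun g => l.filter (fun p => p.2 == g))).Pairwise lexLt := by
  intro gs
  induction gs with
  | nil => intro l _ _; simp
  | cons g gs ih =>
    intro l hgs hl
    simp only [List.flatMap_cons]
    rw [List.pairwise_append]
    have hgs' := List.pairwise_cons.1 hgs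
    refine ⟨?_, ih l hgs'.2 hl, ?_⟩
    · refine List.Pairwise.imp_of_mem ?_ (hl.filter _)
      intro a b ha hb hab
      have ha2 : a.2 = g := by simpa using (List.mem_filter.1 ha).2
      have hb2 : b.2 = g := by simpa using (List.mem_filter.1 hb).2
      exact Or.inr ⟨ha2.trans hb2.symm, hab⟩
    · intro a ha b hb
      have ha2 : a.2 = g := by simpa using (List.mem_filter.1 ha).2
      obtain ⟨g', hg', hbf⟩ := List.mem_flatMap.1 hb
      have hb2 : b.2 = g' := by simpa using (List.mem_filter.1 hbf).2
      exact Or.inl (by rw [ha2, hb2]; exact hgs'.1 g' hg')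

-- ---------- quota initialisation ----------
theorem getD_foldl_modify_sub (l : List Int) : ∀ (d : PySem.Dict Int Int) (v : Int),
    (l.foldl (fun d x => d.modify x 0 (· - 1)) d).getD v 0 = d.getD v 0 - (l.count v : Int) := by
  induction l with
  | nil => intro d v; simp
  | cons x rest ih =>
    intro d v
    simp only [List.foldl_cons]
    rw [ih]
    simp only [PySem.Dict.modify]
    rw [PySem.Dict.getD_insert]
    by_cases hv : v = x
    · subst hv
      rw [if_pos rfl, List.count_cons_self]
      push_cast
      ring
    · rw [if_neg hv]
      have hcnt : (x :: rest).count v = rest.count v := by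
        simp [List.count_cons, Ne.symm hv]
      rw [hcnt]

theorem quota_inv (base : List Int) (z : Int) (h1 : 1 ≤ z) (h5 : z ≤ 5) :
    (base.foldl (fun d n => d.modify (zoneB n) 0 (· - 1))
        ((PySem.List.pyRange 1 6 1).foldl (fun d z => d.insert z (2 : Int)) PySem.Dict.empty)).getD z 0
      = 2 - (PySem.Dict.counter (base.map zoneA)).getD z 0 := by
  have hfold : base.foldl (fun d n => d.modify (zoneB n) 0 (· - 1))
        ((PySem.List.pyRange 1 6 1).foldl (fun d z => d.insert z (2 : Int)) PySem.Dict.empty)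
      = (base.map zoneB).foldl (fun d x => d.modify x 0 (· - 1))
        ((PySem.List.pyRange 1 6 1).foldl (fun d z => d.insert z (2 : Int)) PySem.Dict.empty) := by
    rw [List.foldl_map]
  rw [hfold, getD_foldl_modify_sub, PySem.Dict.getD_counter,
    show base.map zoneA = base.map zoneB from List.map_congr_left (fun x _ => zone_eq x)]
  have h2 : ((PySem.List.pyRange 1 6 1).foldl (fun d z => d.insert z (2 : Int))
      PySem.Dict.empty).getD z 0 = 2 := by
    interval_cases z <;> decide
  rw [h2]

-- ---------- the combined fill pass ----------
theorem passAux (bet1 base : List Int) (slots : Int) (hslots : slots = 6 - (base.length : Int)) :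
    ∀ (ns picked leftovers : List Int) (zu q : PySem.Dict Int Int),
    ns.Nodup → (∀ n ∈ ns, n ∉ picked) →
    (∀ z : Int, 1 ≤ z → z ≤ 5 → q.getD z 0 = 2 - zu.getD z 0) →
    (ns.foldl (A1 bet1) (base ++ picked, zu)).1
        = base ++ (ns.foldl (classB bet1 base slots) (picked, leftovers, q)).1
    ∧ (ns.foldl (classB bet1 base slots) (picked, leftovers, q)).2.1
        = leftovers ++ ns.filter (fun n => decide (n ∉ bet1 ∧ n ∉ base ∧
            n ∉ (ns.foldl (classB bet1 base slots) (picked, leftovers, q)).1))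
    ∧ ∃ qq, (ns.foldl (classB bet1 base slots) (picked, leftovers, q)).1 = picked ++ qq
        ∧ ∀ x ∈ qq, x ∈ ns := by
  intro ns
  induction ns with
  | nil =>
    intro picked leftovers zu q _ _ _
    exact ⟨rfl, by simp, [], by simp, by simp⟩
  | cons n rest ih =>
    intro picked leftovers zu q hnd hpk hzq
    have hnd' := (List.nodup_cons.1 hnd).2
    have hhd : n ∉ rest := (List.nodup_cons.1 hnd).1
    simp only [List.foldl_cons]
    by_cases hscreen : n ∈ bet1 ∨ n ∈ base
    · have hB : classB bet1 base slots (picked, leftovers, q) n = (picked, leftovers, q) := by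
        simp [classB, hscreen]
      have hA : A1 bet1 (base ++ picked, zu) n = (base ++ picked, zu) := by
        rcases hscreen with h | h <;> simp [A1, passA1, h]
      simp only [hB, hA]
      obtain ⟨c1, c2, qq, hq, hqm⟩ := ih picked leftovers zu q hnd'
        (fun x hx => hpk x (by simp [hx])) hzq
      refine ⟨c1, ?_, qq, hq, fun x hx => by simp [hqm x hx]⟩
      rw [c2, List.filter_cons]
      have hcond : ¬(n ∉ bet1 ∧ n ∉ base ∧
          n ∉ (rest.foldl (classB bet1 base slots) (picked, leftovers, q)).1) := by
        tauto
      simp [hcond]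
    · push_neg at hscreen
      obtain ⟨hb1, hb2⟩ := hscreen
      have hb3 : n ∉ picked := hpk n (by simp)
      have hz15 := zoneB_bounds n
      by_cases hsel : (picked.length : Int) < slots ∧ 0 < q.getD (zoneB n) 0
      · have hB : classB bet1 base slots (picked, leftovers, q) n
            = (picked ++ [n], leftovers, q.modify (zoneB n) 0 (· - 1)) := by
          simp only [classB]
          rw [if_neg (by tauto), if_pos hsel]
      -- A also picks
        have hA : A1 bet1 (base ++ picked, zu) n
            = (base ++ (picked ++ [n]), zu.modify (zoneA n) 0 (· + 1)) := by
          simp only [A1, passA1]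
          rw [if_pos ⟨hb1, by simp [hb2, hb3], by
              have hs := hsel.1
              rw [hslots] at hs
              simp only [List.length_append]
              omega⟩]
          rw [if_pos (by
              have hs := hsel.2
              rw [hzq (zoneB n) hz15.1 hz15.2] at hs
              rw [zone_eq]
              omega), List.append_assoc]
        simp only [hB, hA]
        have hzq' : ∀ z : Int, 1 ≤ z → z ≤ 5 →
            (q.modify (zoneB n) 0 (· - 1)).getD z 0
              = 2 - (zu.modify (zoneA n) 0 (· + 1)).getD z 0 := by
          intro z hz1 hz5
          simp only [PySem.Dict.modify, zone_eq]
          rw [PySem.Dict.getD_insert, PySem.Dict.getD_insert]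
          by_cases hzz : z = zoneB n
          · rw [if_pos hzz, if_pos hzz, hzq (zoneB n) hz15.1 hz15.2]
            ring
          · rw [if_neg hzz, if_neg hzz, hzq z hz1 hz5]
        obtain ⟨c1, c2, qq, hq, hqm⟩ := ih (picked ++ [n]) leftovers _ _ hnd'
          (fun x hx hmem => by
            rcases List.mem_append.1 hmem with h | h
            · exact hpk x (by simp [hx]) h
            · exact hhd ((by simpa using h : x = n) ▸ hx))
          hzq'
        refine ⟨c1, ?_, n :: qq, by rw [hq]; simp, ?_⟩
        · rw [c2, List.filter_cons]
          have hcond : ¬(n ∉ bet1 ∧ n ∉ base ∧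
              n ∉ (rest.foldl (classB bet1 base slots)
                (picked ++ [n], leftovers, q.modify (zoneB n) 0 (· - 1))).1) := by
            intro hcon
            exact hcon.2.2 (by rw [hq]; simp)
          simp [hcond]
        · intro x hx
          rcases List.mem_cons.1 hx with rfl | h
          · simp
          · simp [hqm x h]
      · -- goes to leftovers; A also skips
        have hB : classB bet1 base slots (picked, leftovers, q) n
            = (picked, leftovers ++ [n], q) := by
          simp only [classB]
          rw [if_neg (by tauto), if_neg hsel]
        have hA : A1 bet1 (base ++ picked, zu) n = (base ++ picked, zu) := by
          simp only [A1, passA1]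
          by_cases hc : n ∉ bet1 ∧ n ∉ base ++ picked ∧ (base ++ picked).length < 6
          · rw [if_pos hc, if_neg]
            rw [zone_eq]
            have hlen : (picked.length : Int) < slots := by
              have hc3 := hc.2.2
              rw [hslots]
              simp only [List.length_append] at hc3
              omega
            have hq0 : ¬ 0 < q.getD (zoneB n) 0 := fun h => hsel ⟨hlen, h⟩
            rw [hzq (zoneB n) hz15.1 hz15.2] at hq0
            omega
          · rw [if_neg hc]
        simp only [hB, hA]
        obtain ⟨c1, c2, qq, hq, hqm⟩ := ih picked (leftovers ++ [n]) zu q hnd'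
          (fun x hx => hpk x (by simp [hx])) hzq
        refine ⟨c1, ?_, qq, hq, fun x hx => by simp [hqm x hx]⟩
        rw [c2, List.filter_cons]
        have hkeep : (n ∉ bet1 ∧ n ∉ base ∧
            n ∉ (rest.foldl (classB bet1 base slots) (picked, leftovers ++ [n], q)).1) := by
          refine ⟨hb1, hb2, ?_⟩
          rw [hq]
          intro hmem
          rcases List.mem_append.1 hmem with h | h
          · exact hb3 h
          · exact hhd (hqm _ h)
        simp only [decide_eq_true hkeep, if_true]
        simp

theorem pass2Aux (bet1 : List Int) : ∀ (ns nbF extra : List Int),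
    ns.Nodup → (∀ n ∈ ns, n ∉ extra) →
    ns.foldl (A2 bet1) (nbF ++ extra)
      = ((ns.filter (fun n => decide (n ∉ bet1 ∧ n ∉ nbF))).foldl extB (nbF ++ extra)) := by
  intro ns
  induction ns with
  | nil => intro nbF extra _ _; simp
  | cons n rest ih =>
    intro nbF extra hnd hex
    have hnd' := (List.nodup_cons.1 hnd).2
    have hhd : n ∉ rest := (List.nodup_cons.1 hnd).1
    simp only [List.foldl_cons, List.filter_cons]
    by_cases hp : n ∉ bet1 ∧ n ∉ nbF
    · rw [decide_eq_true hp]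
      simp only [if_true, List.foldl_cons]
      have hnx : n ∉ extra := hex n (by simp)
      by_cases hlen : (nbF ++ extra).length < 6
      · have hA : A2 bet1 (nbF ++ extra) n = nbF ++ (extra ++ [n]) := by
          simp only [A2, passA2]
          rw [if_pos ⟨hp.1, by simp [hp.2, hnx], hlen⟩, List.append_assoc]
        have hE : extB (nbF ++ extra) n = nbF ++ (extra ++ [n]) := by
          simp only [extB]
          rw [if_pos hlen, List.append_assoc]
        rw [hA, hE]
        exact ih nbF (extra ++ [n]) hnd' (fun x hx hmem => by
          rcases List.mem_append.1 hmem with h | h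
          · exact hex x (by simp [hx]) h
          · exact hhd ((by simpa using h : x = n) ▸ hx))
      · have hA : A2 bet1 (nbF ++ extra) n = nbF ++ extra := by
          simp only [A2, passA2]
          rw [if_neg (by tauto)]
        have hE : extB (nbF ++ extra) n = nbF ++ extra := by
          simp only [extB]
          rw [if_neg hlen]
        rw [hA, hE]
        exact ih nbF extra hnd' (fun x hx => hex x (by simp [hx]))
    · rw [show (decide (n ∉ bet1 ∧ n ∉ nbF)) = false by simpa using hp]
      simp only [Bool.false_eq_true, if_false]
      have hA : A2 bet1 (nbF ++ extra) n = nbF ++ extra := by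
        simp only [A2, passA2]
        rw [if_neg (by
          intro hcon
          rcases not_and_or.1 hp with h | h
          · exact h hcon.1
          · exact h (fun hm => hcon.2.1 (List.mem_append_left _ hm)))]
      rw [hA]
      exact ih nbF extra hnd' (fun x hx => hex x (by simp [hx]))

-- ===== VERDICT (by name: the statement is the Claim_ definition above) =====
set_option maxRecDepth 8000 in
set_option maxHeartbeats 3000000 in
theorem diversify_biglotto_py_spec : Claim_equal_diversify_biglotto_py := by
  intro bet1 bet2 history mo _hDom hPre
  unfold Spec_diversify_biglotto_py
  unfold diversify_biglotto_py diversify_biglotto_py_alt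
  simp only []
  by_cases hov : ((PySem.Set.inter (PySem.Set.ofList bet1) (PySem.Set.ofList bet2)).length : Int) ≤ mo
  · simp only [if_pos hov]
  · simp only [if_neg hov]
    set R := (if history.length ≥ 50 then PySem.List.slice history (some (-50)) none else history) with hR
    have hnums : ∀ h ∈ R, ∀ num ∈ (PySem.Dict.mk h).getD "numbers" [], 1 ≤ num ∧ num ≤ 49 := by
      rcases hPre with h | h
      · exact absurd h hov
      · exact fun hh hm => (h hh hm).2
    set L : Int := (R.length : Int) with hL
    have hL0 : 0 ≤ L := by rw [hL]; exact Int.natCast_nonneg _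
    set gap_of := (PySem.List.enumerate R.reverse).foldl rowB PySem.Dict.empty with hgap
    have hGb : ∀ n : Int, 0 ≤ gap_of.getD n L ∧ gap_of.getD n L ≤ L := by
      intro n
      rw [hgap, hL]
      exact gap_bounds R n
    -- A's table items are (n, gap_of.getD n L) over 1..49
    have hlink0 : ((PySem.List.pyRange 1 (49 + 1) 1).foldl
        (fun d i => d.insert i L) PySem.Dict.empty).items
        = (PySem.List.pyRange 1 (49 + 1) 1).map
            (fun n => (n, (PySem.Dict.empty : PySem.Dict Int Int).getD n L)) := by
      rw [PySem.Dict.items_foldl_insert_fresh _ (fun i => i) (fun _ => L) _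
        (fun a _ => PySem.Dict.contains_empty a) (by simpa using PySem.List.nodup_pyRange_one 1 50)]
      simp [PySem.Dict.getD_empty]
      rfl
    have htab := tableAux L R 0
      ((PySem.List.pyRange 1 (49 + 1) 1).foldl (fun d i => d.insert i L) PySem.Dict.empty)
      PySem.Dict.empty hnums hlink0 (fun n => by rw [PySem.Dict.getD_empty]; omega)
    set IA := ((PySem.List.enumerate R).foldl (rowA L)
      ((PySem.List.pyRange 1 (49 + 1) 1).foldl (fun d i => d.insert i L) PySem.Dict.empty)).items with hIAdef
    have hIA : IA = (PySem.List.pyRange 1 (49 + 1) 1).map (fun n => (n, gap_of.getD n L)) := by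
      rw [htab]
      apply List.map_congr_left
      intro n _
      rw [hgap, hL]
      exact congrArg (fun v => (n, v)) (fwd_rev_eq R n)
    set C := PySem.List.sorted IA (fun x => -x.2) with hC
    set gs := PySem.List.pyRange L (-1) (-1) with hgs
    have hgs_eq : gs = (PySem.List.pyRange 0 (L + 1)).reverse := by
      rw [hgs, PySem.List.pyRange_neg_one_eq_reverse]
      norm_num
    have hgs_pw : gs.Pairwise (fun a b => b < a) := by
      rw [hgs_eq]
      exact List.pairwise_reverse.2 (by simpa using PySem.List.pairwise_lt_pyRange_one 0 (L + 1))
    have hgs_nd : gs.Nodup := by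
      rw [hgs_eq]
      exact List.nodup_reverse.2 (PySem.List.nodup_pyRange_one 0 (L + 1))
    have hIA_pw : IA.Pairwise (fun a b => a.1 < b.1) := by
      rw [hIA]
      exact (List.pairwise_map).2 (by simpa using PySem.List.pairwise_lt_pyRange_one 1 50)
    have hC_pw : C.Pairwise lexLt := by
      rw [hC]
      exact stable_sort_pairwise IA hIA_pw
    have hcov : ∀ p ∈ IA, p.2 ∈ gs := by
      intro p hp
      rw [hIA] at hp
      obtain ⟨n, hn, rfl⟩ := List.mem_map.1 hp
      rw [hgs]
      exact (PySem.List.mem_pyRange_neg_one).2 ⟨by have := (hGb n).1; omega, (hGb n).2⟩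
    have hcold : C = gs.flatMap (fun g => IA.filter (fun p => p.2 == g)) := by
      apply perm_lex_eq
      · exact (PySem.List.sorted_perm IA _ false).trans (flat_perm gs IA hgs_nd hcov).symm
      · exact hC_pw
      · exact flat_pairwise gs IA hgs_pw hIA_pw
    have hfst : C.map Prod.fst = gs.flatMap (fun g =>
        (PySem.List.pyRange 1 (49 + 1) 1).filter (fun n => gap_of.getD n L == g)) := by
      rw [hcold, List.map_flatMap]
      apply List.flatMap_congr
      intro g _
      rw [hIA, List.filter_map, List.map_map]
      have h1 : ((fun p : Int × Int => p.2 == g) ∘ fun n : Int => (n, gap_of.getD n L))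
          = fun n : Int => gap_of.getD n L == g := rfl
      have h2 : (Prod.fst ∘ fun n : Int => (n, gap_of.getD n L)) = id := rfl
      rw [h1, h2, List.map_id]
    have hndC : (C.map Prod.fst).Nodup := by
      have hperm : (C.map Prod.fst).Perm (IA.map Prod.fst) :=
        (PySem.List.sorted_perm IA _ false).map Prod.fst
      refine hperm.nodup_iff.2 ?_
      rw [hIA, List.map_map]
      have h2 : (Prod.fst ∘ fun n : Int => (n, gap_of.getD n L)) = id := rfl
      rw [h2, List.map_id]
      exact PySem.List.nodup_pyRange_one 1 50
    -- shared data of the two fill phases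
    set baseL := PySem.List.slice (bet2.filter (fun n =>
      !((PySem.Set.inter (PySem.Set.ofList bet1) (PySem.Set.ofList bet2)).contains n)))
      none (some mo) with hbase
    set zu := PySem.Dict.counter (baseL.map zoneA) with hzu
    set q0 := (PySem.List.pyRange 1 6 1).foldl (fun d z => d.insert z (2 : Int)) PySem.Dict.empty with hq0
    set qD := baseL.foldl (fun d n => d.modify (zoneB n) 0 (· - 1)) q0 with hqD
    set slots := (6 : Int) - (baseL.length : Int) with hslots
    set bk0 := (PySem.List.pyRange 0 (L + 1) 1).map (fun _ => ([] : List Int)) with hbk0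
    set bks := (PySem.List.pyRange 1 (49 + 1) 1).foldl (dropB gap_of L) bk0 with hbks
    have hlen0 : bk0.length = (L + 1).toNat := by
      rw [hbk0, List.length_map, PySem.List.length_pyRange_one]
      norm_num
    have hbchar := bucket_char gap_of L hGb (PySem.List.pyRange 1 (49 + 1) 1) bk0 hlen0
    set stB := (C.map Prod.fst).foldl (classB bet1 baseL slots)
      (([] : List Int), ([] : List Int), qD) with hstB
    -- B's nested bucket loop is the single pass over the cold numbers
    have hinner : gs.foldl
        (fun st g => (PySem.List.pyGetD bks g []).foldl (classB bet1 baseL slots) st)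
        (([] : List Int), ([] : List Int), qD) = stB := by
      rw [hstB, hfst, List.foldl_flatMap]
      apply PySem.List.foldl_congr_mem
      intro st g hg
      rw [hgs] at hg
      have hgb := (PySem.List.mem_pyRange_neg_one).1 hg
      rw [hbks, hbchar.2 g (by omega) (by omega),
        show PySem.List.pyGetD bk0 g [] = [] from by
          rw [hbk0]
          exact PySem.List.pyGetD_map_pyRange_of_nonneg (fun _ => ([] : List Int)) (L + 1) g []
            (by omega) (by omega),
        List.nil_append]
    -- the combined pass
    obtain ⟨c1, c2, -⟩ := passAux bet1 baseL slots hslots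
      (C.map Prod.fst) [] [] zu qD hndC (by simp)
      (fun z h1 h5 => by rw [hqD, hq0, hzu]; exact quota_inv baseL z h1 h5)
    rw [List.append_nil] at c1
    rw [List.nil_append] at c2
    rw [← hstB] at c1 c2
    have hA1fold : C.foldl (passA1 bet1) ((baseL, zu) : List Int × PySem.Dict Int Int)
        = (C.map Prod.fst).foldl (A1 bet1) (baseL, zu) := by
      rw [List.foldl_map]
      exact PySem.List.foldl_congr_mem C _ _ _ (fun acc x _ => rfl)
    have hA2fold : ∀ init : List Int, C.foldl (passA2 bet1) init
        = (C.map Prod.fst).foldl (A2 bet1) init := by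
      intro init
      rw [List.foldl_map]
      exact PySem.List.foldl_congr_mem C _ _ _ (fun acc x _ => rfl)
    -- A's final list equals B's final list
    have hnb2 : C.foldl (passA2 bet1) ((C.foldl (passA1 bet1) (baseL, zu)).1)
        = baseL ++ stB.1 ++ stB.2.1.take (6 - (baseL ++ stB.1).length) := by
      rw [hA1fold, c1, hA2fold]
      have hp2 := pass2Aux bet1 (C.map Prod.fst) (baseL ++ stB.1) [] hndC (by simp)
      rw [List.append_nil] at hp2
      rw [hp2]
      have hfeq : (C.map Prod.fst).filter (fun n => decide (n ∉ bet1 ∧ n ∉ baseL ++ stB.1))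
          = (C.map Prod.fst).filter (fun n => decide (n ∉ bet1 ∧ n ∉ baseL ∧ n ∉ stB.1)) := by
        apply List.filter_congr
        intro x _
        simp [List.mem_append]
      have e2 : (C.map Prod.fst).filter (fun n => decide (n ∉ bet1 ∧ n ∉ baseL ++ stB.1))
          = stB.2.1 := hfeq.trans c2.symm
      rw [e2]
      rw [extB_take]
    have hextra : PySem.List.slice stB.2.1 none (some (max 0 (slots - (stB.1.length : Int))))
        = stB.2.1.take (6 - (baseL ++ stB.1).length) := by
      rw [PySem.List.slice_to _ (le_max_left 0 _)]
      have harg : (max 0 (slots - (stB.1.length : Int))).toNat = 6 - (baseL ++ stB.1).length := by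
        rw [hslots]
        simp only [List.length_append]
        omega
      rw [harg]
    rw [hinner, hnb2, hextra]
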